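-- pv_equiv track=rewrite | github.com/Hakutaku23/industrial-plugin-platform | apps/api/platform_api/services/instance_validation.py | _duplicate_names
-- ===== SOURCE A (Python) =====
-- def _duplicate_names(values: list[str]) -> list[str]:
--     seen: set[str] = set()
--     duplicates: set[str] = set()
--     for value in values:
--         if value in seen:
--             duplicates.add(value)
--         else:
--             seen.add(value)
--     return sorted(duplicates)
-- ===== SOURCE B (Python) =====
-- def _duplicate_names(values: list[str]) -> list[str]:
--     # Sort first, then scan runs of equal adjacent elements; a run of length
--     # >= 2 contributes its value once.  Output is sorted by construction.
--     xs = sorted(values)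
--     out = []
--     i, n = 0, len(xs)
--     while i < n:
--         j = i + 1
--         while j < n and xs[j] == xs[i]:
--             j += 1
--         if j - i > 1:
--             out.append(xs[i])
--         i = j
--     return out
-- ===== Notes on version B (the rewrite author's own statement) =====
-- stated objective: alternative
-- what changed: Replaces A's one-pass seen/duplicates set bookkeeping by a sort-then-scan algorithm: sort the whole input first, then walk runs of equal adjacent elements and emit each value whose run has length at least 2 (output already in order, no set or dict at all).
import Mathlib
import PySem

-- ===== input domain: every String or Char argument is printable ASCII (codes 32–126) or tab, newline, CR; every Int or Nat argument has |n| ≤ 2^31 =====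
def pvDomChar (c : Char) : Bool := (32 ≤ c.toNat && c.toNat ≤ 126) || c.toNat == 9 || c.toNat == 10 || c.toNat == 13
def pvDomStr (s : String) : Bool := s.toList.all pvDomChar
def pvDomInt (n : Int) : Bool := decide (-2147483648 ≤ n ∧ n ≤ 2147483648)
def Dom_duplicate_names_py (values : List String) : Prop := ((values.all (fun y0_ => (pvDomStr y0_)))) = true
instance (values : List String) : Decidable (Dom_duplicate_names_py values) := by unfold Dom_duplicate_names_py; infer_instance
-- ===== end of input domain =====

-- B replaces A's one-pass seen/duplicates set bookkeeping by sort-then-scan: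
-- sort the input, then walk runs of equal adjacent elements, emitting values with run length ≥ 2.

-- ===== PORT A =====
def duplicate_names_py (values : List String) : List String :=
  let st := values.foldl
    (fun (st : PySem.Set String × PySem.Set String) value =>
      if PySem.Set.contains st.1 value then (st.1, PySem.Set.add st.2 value)
      else (PySem.Set.add st.1 value, st.2))
    (PySem.Set.empty, PySem.Set.empty)
  PySem.List.sorted st.2 (fun x => x) false

-- ===== PORT B =====
-- the outer while loop of Source B: at each run head x, the inner while skips the
-- equal adjacent elements (dropWhile); the head is appended iff something was skipped.
def pvRuns : List String → List String
  | [] => []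
  | x :: xs =>
    let rest := xs.dropWhile (fun y => y == x)
    if rest.length < xs.length then x :: pvRuns rest else pvRuns rest
termination_by l => l.length
decreasing_by
  all_goals
    exact Nat.lt_succ_of_le (List.length_dropWhile_le _ _)

def duplicate_names_py_alt (values : List String) : List String :=
  pvRuns (PySem.List.sorted values (fun x => x) false)

-- ===== PRECONDITION & SPEC =====
def Spec_duplicate_names_py (values : List String) (out : List String) : Prop := out = duplicate_names_py_alt values
instance (values : List String) (out : List String) : Decidable (Spec_duplicate_names_py values out) := by unfold Spec_duplicate_names_py; infer_instance

-- ===== CLAIM (what is proved, stated in full; the proofs are below) =====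
def Claim_equal_duplicate_names_py : Prop := ∀ (values : List String), Dom_duplicate_names_py values → Spec_duplicate_names_py values (duplicate_names_py values)

-- ===== LEMMAS AND PROOFS =====

-- invariant of A's loop: the duplicates set stays Nodup, and its members are
-- exactly the old members, the already-seen values re-encountered, and the values occurring twice.
lemma afold_invariant (l : List String) (s d : PySem.Set String) (hd : d.Nodup) :
    (l.foldl
      (fun (st : PySem.Set String × PySem.Set String) value =>
        if PySem.Set.contains st.1 value then (st.1, PySem.Set.add st.2 value)
        else (PySem.Set.add st.1 value, st.2)) (s, d)).2.Nodup ∧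
    (∀ x, x ∈ (l.foldl
      (fun (st : PySem.Set String × PySem.Set String) value =>
        if PySem.Set.contains st.1 value then (st.1, PySem.Set.add st.2 value)
        else (PySem.Set.add st.1 value, st.2)) (s, d)).2 ↔
      x ∈ d ∨ (x ∈ s ∧ x ∈ l) ∨ 2 ≤ l.count x) := by
  induction l generalizing s d with
  | nil => simp [hd]
  | cons v tl ih =>
    simp only [List.foldl_cons]
    by_cases hv : v ∈ s
    · rw [if_pos ((PySem.Set.contains_iff _ _).mpr hv)]
      obtain ⟨h1, h2⟩ := ih s (PySem.Set.add d v) (PySem.Set.nodup_add _ _ hd)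
      refine ⟨h1, fun x => (h2 x).trans ?_⟩
      simp only [PySem.Set.mem_add, List.count_cons, List.mem_cons]
      by_cases hx : x = v
      · subst hx; simp [hv]
      · simp [hx, Ne.symm hx]
    · rw [if_neg (by simp [hv])]
      obtain ⟨h1, h2⟩ := ih (PySem.Set.add s v) d hd
      refine ⟨h1, fun x => (h2 x).trans ?_⟩
      simp only [PySem.Set.mem_add, List.count_cons, List.mem_cons]
      by_cases hx : x = v
      · subst hx
        simp only [hv, or_true, true_and, beq_self_eq_true, if_true, false_and, false_or]
        constructor
        · rintro (h | h | h)
          · exact Or.inl h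
          · right
            have : 1 ≤ tl.count x := List.count_pos_iff.mpr h
            omega
          · right; omega
        · rintro (h | h)
          · exact Or.inl h
          · by_cases ht : x ∈ tl
            · exact Or.inr (Or.inl ht)
            · have : tl.count x = 0 := List.count_eq_zero.mpr ht
              omega
      · simp [hx, Ne.symm hx]

-- A's pre-sort list characterised
lemma a_dup_mem (values : List String) (x : String) :
    x ∈ (values.foldl
      (fun (st : PySem.Set String × PySem.Set String) value =>
        if PySem.Set.contains st.1 value then (st.1, PySem.Set.add st.2 value)
        else (PySem.Set.add st.1 value, st.2)) (PySem.Set.empty, PySem.Set.empty)).2 ↔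
    2 ≤ values.count x := by
  have h := (afold_invariant values PySem.Set.empty PySem.Set.empty (by simp [PySem.Set.empty])).2 x
  simpa [PySem.Set.empty] using h

lemma pvRuns_subset (l : List String) : ∀ x ∈ pvRuns l, x ∈ l := by
  induction l using pvRuns.induct with
  | case1 => simp [pvRuns]
  | case2 x xs rest hlt ih =>
    have hlt' : (xs.dropWhile (fun y => y == x)).length < xs.length := hlt
    intro y hy
    rw [pvRuns] at hy
    simp only [if_pos hlt'] at hy
    rcases List.mem_cons.mp hy with h | h
    · simp [h]
    · exact List.mem_cons_of_mem _ ((xs.dropWhile_sublist _).mem (ih y h))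
  | case3 x xs rest hlt ih =>
    have hlt' : ¬ (xs.dropWhile (fun y => y == x)).length < xs.length := hlt
    intro y hy
    rw [pvRuns] at hy
    simp only [if_neg hlt'] at hy
    exact List.mem_cons_of_mem _ ((xs.dropWhile_sublist _).mem (ih y hy))

-- on a sorted list, everything surviving dropWhile (== x) is strictly above x
lemma dropWhile_sorted_gt (x : String) (xs : List String)
    (hle : ∀ y ∈ xs, x ≤ y) (hpw : xs.Pairwise (· ≤ ·)) :
    ∀ y ∈ xs.dropWhile (fun y => y == x), x < y := by
  induction xs with
  | nil => simp
  | cons a t ih =>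
    by_cases ha : a = x
    · subst ha
      rw [List.dropWhile_cons_of_pos (by simp)]
      exact ih (fun y hy => hle y (List.mem_cons_of_mem _ hy)) hpw.of_cons
    · rw [List.dropWhile_cons_of_neg (by simp [ha])]
      intro y hy
      have hxa : x < a := lt_of_le_of_ne (hle a (List.mem_cons_self)) (Ne.symm ha)
      rcases List.mem_cons.mp hy with h | h
      · exact h ▸ hxa
      · exact lt_of_lt_of_le hxa ((List.pairwise_cons.mp hpw).1 y h)

-- the run scan on a sorted list: strictly increasing output whose members are exactly
-- the values occurring at least twice
lemma pvRuns_spec (l : List String) (h : l.Pairwise (· ≤ ·)) :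
    (pvRuns l).Pairwise (· < ·) ∧ ∀ x, x ∈ pvRuns l ↔ 2 ≤ l.count x := by
  induction l using pvRuns.induct with
  | case1 => simp [pvRuns]
  | case2 x xs rest hlt ih =>
    have hx_le : ∀ y ∈ xs, x ≤ y := fun y hy => (List.pairwise_cons.mp h).1 y hy
    have hxs_pw : xs.Pairwise (· ≤ ·) := (List.pairwise_cons.mp h).2
    have hrest_pw : (xs.dropWhile (fun y => y == x)).Pairwise (· ≤ ·) :=
      hxs_pw.sublist (xs.dropWhile_sublist _)
    have hgt : ∀ y ∈ xs.dropWhile (fun y => y == x), x < y :=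
      dropWhile_sorted_gt x xs hx_le hxs_pw
    have htw : ∀ y ∈ xs.takeWhile (fun y => y == x), y = x := by
      intro y hy
      simpa using List.mem_takeWhile_imp hy
    have hsplit : xs = xs.takeWhile (fun y => y == x) ++ xs.dropWhile (fun y => y == x) :=
      (List.takeWhile_append_dropWhile).symm
    have hcx_rest : (xs.dropWhile (fun y => y == x)).count x = 0 :=
      List.count_eq_zero.mpr (fun hc => absurd (hgt x hc) (lt_irrefl x))
    have hcx_tw : (xs.takeWhile (fun y => y == x)).count x
        = (xs.takeWhile (fun y => y == x)).length := by
      apply List.count_eq_length.mpr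
      intro y hy; exact (htw y hy).symm
    have hxs_cx : xs.count x = (xs.takeWhile (fun y => y == x)).length := by
      nth_rewrite 1 [hsplit]
      rw [List.count_append, hcx_tw, hcx_rest]
      omega
    have hcount_x : (x :: xs).count x = 1 + (xs.takeWhile (fun y => y == x)).length := by
      rw [List.count_cons_self, hxs_cx]; omega
    have hcount_ne : ∀ z, z ≠ x →
        (x :: xs).count z = (xs.dropWhile (fun y => y == x)).count z := by
      intro z hz
      have hxs_cz : xs.count z = (xs.dropWhile (fun y => y == x)).count z := by
        nth_rewrite 1 [hsplit]
        rw [List.count_append, List.count_eq_zero.mpr (fun hc => hz (htw z hc))]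
        omega
      simp [hxs_cz, Ne.symm hz]
    have hlen : xs.length = (xs.takeWhile (fun y => y == x)).length
        + (xs.dropWhile (fun y => y == x)).length := by
      nth_rewrite 1 [hsplit]
      exact List.length_append
    obtain ⟨ih1, ih2⟩ := ih hrest_pw
    have hlt' : (xs.dropWhile (fun y => y == x)).length < xs.length := hlt
    have hout : pvRuns (x :: xs) = x :: pvRuns (xs.dropWhile (fun y => y == x)) := by
      rw [pvRuns]; simp only [if_pos hlt']
    constructor
    · rw [hout]
      exact List.pairwise_cons.mpr
        ⟨fun y hy => hgt y (pvRuns_subset _ y hy), ih1⟩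
    · intro z
      rw [hout]
      by_cases hz : z = x
      · subst hz
        simp only [List.mem_cons, true_or, true_iff, hcount_x]
        omega
      · rw [List.mem_cons, or_iff_right hz, ih2, hcount_ne z hz]
  | case3 x xs rest hlt ih =>
    have hx_le : ∀ y ∈ xs, x ≤ y := fun y hy => (List.pairwise_cons.mp h).1 y hy
    have hxs_pw : xs.Pairwise (· ≤ ·) := (List.pairwise_cons.mp h).2
    have hrest_pw : (xs.dropWhile (fun y => y == x)).Pairwise (· ≤ ·) :=
      hxs_pw.sublist (xs.dropWhile_sublist _)
    have hgt : ∀ y ∈ xs.dropWhile (fun y => y == x), x < y :=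
      dropWhile_sorted_gt x xs hx_le hxs_pw
    have htw : ∀ y ∈ xs.takeWhile (fun y => y == x), y = x := by
      intro y hy
      simpa using List.mem_takeWhile_imp hy
    have hsplit : xs = xs.takeWhile (fun y => y == x) ++ xs.dropWhile (fun y => y == x) :=
      (List.takeWhile_append_dropWhile).symm
    have hcx_rest : (xs.dropWhile (fun y => y == x)).count x = 0 :=
      List.count_eq_zero.mpr (fun hc => absurd (hgt x hc) (lt_irrefl x))
    have hcx_tw : (xs.takeWhile (fun y => y == x)).count x
        = (xs.takeWhile (fun y => y == x)).length := by
      apply List.count_eq_length.mpr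
      intro y hy; exact (htw y hy).symm
    have hxs_cx : xs.count x = (xs.takeWhile (fun y => y == x)).length := by
      nth_rewrite 1 [hsplit]
      rw [List.count_append, hcx_tw, hcx_rest]
      omega
    have hcount_x : (x :: xs).count x = 1 + (xs.takeWhile (fun y => y == x)).length := by
      rw [List.count_cons_self, hxs_cx]; omega
    have hcount_ne : ∀ z, z ≠ x →
        (x :: xs).count z = (xs.dropWhile (fun y => y == x)).count z := by
      intro z hz
      have hxs_cz : xs.count z = (xs.dropWhile (fun y => y == x)).count z := by
        nth_rewrite 1 [hsplit]
        rw [List.count_append, List.count_eq_zero.mpr (fun hc => hz (htw z hc))]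
        omega
      simp [hxs_cz, Ne.symm hz]
    have hlen : xs.length = (xs.takeWhile (fun y => y == x)).length
        + (xs.dropWhile (fun y => y == x)).length := by
      nth_rewrite 1 [hsplit]
      exact List.length_append
    obtain ⟨ih1, ih2⟩ := ih hrest_pw
    have hlt' : ¬ (xs.dropWhile (fun y => y == x)).length < xs.length := hlt
    have hout : pvRuns (x :: xs) = pvRuns (xs.dropWhile (fun y => y == x)) := by
      rw [pvRuns]; simp only [if_neg hlt']
    have htw_nil : (xs.takeWhile (fun y => y == x)).length = 0 := by omega
    refine ⟨hout ▸ ih1, fun z => ?_⟩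
    rw [hout]
    by_cases hz : z = x
    · subst hz
      constructor
      · intro hc
        exact absurd (hgt z (pvRuns_subset _ z hc)) (lt_irrefl z)
      · rw [hcount_x, htw_nil]; omega
    · rw [ih2, hcount_ne z hz]

-- ===== VERDICT (by name: the statement is the Claim_ definition above) =====
theorem duplicate_names_py_spec : Claim_equal_duplicate_names_py := by
  intro values _
  unfold Spec_duplicate_names_py duplicate_names_py duplicate_names_py_alt
  simp only []
  obtain ⟨hpw, hmem⟩ := pvRuns_spec (PySem.List.sorted values (fun x => x) false)
    (PySem.List.sorted_pairwise values (fun x => x))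
  refine PySem.List.sorted_eq_of_perm_of_pairwise_lt _ _ _ ?_ hpw
  apply (List.perm_ext_iff_of_nodup
    (hpw.imp ne_of_lt)
    (afold_invariant values PySem.Set.empty PySem.Set.empty (by simp [PySem.Set.empty])).1).mpr
  intro z
  rw [hmem z, a_dup_mem,
    ((PySem.List.sorted_perm values (fun x => x) false).count_eq z)]
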